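-- pv_equiv track=rewrite | github.com/ZCheerZ/Reinforcement-learning | Prediction/task_counts.py | calculate_task_counts1
-- ===== SOURCE A (Python) =====
-- def calculate_task_counts1(task_sequence, task_durations):
--     """
--     计算周期内每个时刻正在处理的任务数。
--
--     参数:
--         task_sequence: 任务序列，每个元素为任务类型（整数或字符串）
--         task_durations: 字典，key为任务类型，value为执行时间（整数，单位：时隙）
--
--     返回:
--         counts: 列表，每个时刻的任务数（长度等于任务序列长度）
--     """
--     T = len(task_sequence)  # 周期总时长
--     # 初始化差分数组（长度为T+1，多出一位用于处理结束时刻）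
--     diff = [0] * (T + 1)
--
--     # 遍历每个时刻的任务
--     for t, task_type in enumerate(task_sequence):
--         d = task_durations[task_type]  # 获取当前任务的执行时间
--         # 在开始时刻t标记+1
--         diff[t] += 1
--         # 在结束时刻t + d标记-1（若在周期内）
--         end_time = t + d
--         if end_time < T + 1:  # 确保不越界
--             diff[end_time] -= 1
--
--     # 通过差分数组计算每个时刻的任务数
--     counts = []
--     current_tasks = 0
--     for i in range(T):
--         current_tasks += diff[i]
--         counts.append(current_tasks)
--
--     return counts
-- ===== SOURCE B (Python) =====
-- def calculate_task_counts1(task_sequence, task_durations):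
--     T = len(task_sequence)
--     counts = [0] * T
--     for t, task_type in enumerate(task_sequence):
--         d = task_durations[task_type]
--         for j in range(t, min(t + d, T)):
--             counts[j] += 1
--     return counts
-- ===== Notes on version B (the rewrite author's own statement) =====
-- stated objective: simpler
-- what changed: B increments each task's clipped active interval [t, min(t+d,T)) directly in a counts array, instead of A's difference-array marking followed by a running-sum integration pass.
-- outside the precondition, e.g. on calculate_task_counts1([0], {0: -1}): A returns [1], B returns [0]
import Mathlib
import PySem

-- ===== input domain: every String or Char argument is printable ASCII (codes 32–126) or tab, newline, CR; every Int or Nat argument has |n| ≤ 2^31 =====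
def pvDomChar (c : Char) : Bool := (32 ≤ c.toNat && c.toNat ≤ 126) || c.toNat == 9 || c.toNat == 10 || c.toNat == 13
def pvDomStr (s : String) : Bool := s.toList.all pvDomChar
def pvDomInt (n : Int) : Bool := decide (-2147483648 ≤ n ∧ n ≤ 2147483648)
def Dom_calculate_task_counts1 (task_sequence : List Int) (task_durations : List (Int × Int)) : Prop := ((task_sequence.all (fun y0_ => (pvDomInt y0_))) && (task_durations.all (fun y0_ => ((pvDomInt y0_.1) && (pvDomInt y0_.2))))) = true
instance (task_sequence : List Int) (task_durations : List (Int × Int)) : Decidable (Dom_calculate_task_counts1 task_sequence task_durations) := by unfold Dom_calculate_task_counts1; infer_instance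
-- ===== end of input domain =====

-- B replaces A's difference-array-plus-integration with direct per-task interval increments
-- (objective: simpler); equivalence is about the return value only.

-- shared helper: the dict lookup task_durations[task_type]; KeyError is excluded by Pre_,
-- so 'getD 0' is its total form
def pvDur (td : List (Int × Int)) (x : Int) : Int := (List.lookup x td).getD 0

-- ===== PORT A =====
-- A's loop body: diff[t] += 1; if t+d < T+1: diff[t+d] -= 1
def pvStepA (T : Nat) (td : List (Int × Int)) (diff : List Int) (p : Int × Int) : List Int :=
  let d := pvDur td p.2
  let diff := PySem.List.pySetD diff p.1 (PySem.List.pyGetD diff p.1 0 + 1)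
  let end_time := p.1 + d
  if end_time < (T : Int) + 1 then
    PySem.List.pySetD diff end_time (PySem.List.pyGetD diff end_time 0 - 1)
  else diff

-- A's second loop: running sum over diff, appending each running value
def pvIntegrate (diff : List Int) (T : Nat) : List Int × Int :=
  (PySem.List.pyRange 0 (T : Int) 1).foldl
    (fun p i => (p.1 ++ [p.2 + PySem.List.pyGetD diff i 0], p.2 + PySem.List.pyGetD diff i 0))
    ([], 0)

def calculate_task_counts1 (task_sequence : List Int) (task_durations : List (Int × Int)) : List Int :=
  let T : Nat := task_sequence.length
  let diff : List Int := List.replicate (T + 1) 0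
  let diff := (PySem.List.enumerate task_sequence 0).foldl (pvStepA T task_durations) diff
  (pvIntegrate diff T).1

-- ===== PORT B =====
-- counts[j] += 1
def pvBump (c : List Int) (j : Int) : List Int :=
  PySem.List.pySetD c j (PySem.List.pyGetD c j 0 + 1)

-- B's loop body: for j in range(t, min(t+d, T)): counts[j] += 1
def pvStepB (T : Nat) (td : List (Int × Int)) (counts : List Int) (p : Int × Int) : List Int :=
  (PySem.List.pyRange p.1 (min (p.1 + pvDur td p.2) (T : Int)) 1).foldl pvBump counts

def calculate_task_counts1_alt (task_sequence : List Int) (task_durations : List (Int × Int)) : List Int :=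
  let T : Nat := task_sequence.length
  (PySem.List.enumerate task_sequence 0).foldl (pvStepB T task_durations) (List.replicate T 0)

-- ===== PRECONDITION & SPEC =====
-- Pre_ excludes sequences containing a task type absent from task_durations (Python A raises
-- KeyError there) and negative looked-up durations, which lie outside the natural domain of
-- time spans: on those A's end-time decrement relies on Python negative-index wraparound
-- (or raises IndexError).
def Pre_calculate_task_counts1 (task_sequence : List Int) (task_durations : List (Int × Int)) : Prop :=
  ∀ x ∈ task_sequence, (List.lookup x task_durations).isSome = true ∧
    0 ≤ (List.lookup x task_durations).getD 0

instance (task_sequence : List Int) (task_durations : List (Int × Int)) : Decidable (Pre_calculate_task_counts1 task_sequence task_durations) := by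
  unfold Pre_calculate_task_counts1; infer_instance

def pvWitness_calculate_task_counts1 : List Int × (List (Int × Int)) := ([0, 1, 0], [(0, 2), (1, 1)])

def Spec_calculate_task_counts1 (task_sequence : List Int) (task_durations : List (Int × Int)) (out : List Int) : Prop := out = calculate_task_counts1_alt task_sequence task_durations
instance (task_sequence : List Int) (task_durations : List (Int × Int)) (out : List Int) : Decidable (Spec_calculate_task_counts1 task_sequence task_durations out) := by unfold Spec_calculate_task_counts1; infer_instance

-- ===== CLAIM (what is proved, stated in full; the proofs are below) =====
def Claim_equal_calculate_task_counts1 : Prop := ∀ (task_sequence : List Int) (task_durations : List (Int × Int)), Dom_calculate_task_counts1 task_sequence task_durations → Pre_calculate_task_counts1 task_sequence task_durations → Spec_calculate_task_counts1 task_sequence task_durations (calculate_task_counts1 task_sequence task_durations)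

-- ===== LEMMAS AND PROOFS =====

lemma pvBump_foldl_length (L : List Int) (c : List Int) :
    (L.foldl pvBump c).length = c.length := by
  induction L generalizing c with
  | nil => rfl
  | cons j L ih => simp [List.foldl_cons, ih, pvBump, PySem.List.length_pySetD]

lemma pvBump_foldl_get (L : List Int) : ∀ (c : List Int),
    (∀ j ∈ L, 0 ≤ j ∧ j < (c.length : Int)) → ∀ (k : Nat), k < c.length →
    PySem.List.pyGetD (L.foldl pvBump c) (k : Int) 0
      = PySem.List.pyGetD c (k : Int) 0 + (L.count (k : Int) : Int) := by
  induction L with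
  | nil => intro c _ k _; simp
  | cons j L ih =>
    intro c h k hk
    obtain ⟨hj0, hjlen⟩ := h j (by simp)
    have hjn : j.toNat < c.length := by omega
    have hjt : ((j.toNat : Nat) : Int) = j := Int.toNat_of_nonneg hj0
    have hlen' : (pvBump c j).length = c.length := by
      simp [pvBump, PySem.List.length_pySetD]
    rw [List.foldl_cons,
        ih (pvBump c j) (fun x hx => by rw [hlen']; exact h x (List.mem_cons_of_mem _ hx)) k
          (by rw [hlen']; exact hk)]
    have key : PySem.List.pyGetD (pvBump c j) (k : Int) 0
        = if k = j.toNat then PySem.List.pyGetD c ((j.toNat : Nat) : Int) 0 + 1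
          else PySem.List.pyGetD c (k : Int) 0 := by
      rw [pvBump, ← hjt]
      exact PySem.List.pyGetD_pySetD_natCast c j.toNat k _ 0 hjn
    rw [key, List.count_cons]
    by_cases hkj : k = j.toNat
    · subst hkj
      simp only [hjt, beq_self_eq_true, if_true]
      push_cast
      ring
    · have hne : (j == ((k : Nat) : Int)) = false := by simp; omega
      simp only [if_neg hkj, hne, Bool.false_eq_true, if_false]
      push_cast
      ring

lemma pv_count_pyRange (n : Nat) : ∀ (a b x : Int), (b - a).toNat = n →
    (PySem.List.pyRange a b 1).count x = if a ≤ x ∧ x < b then 1 else 0 := by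
  induction n with
  | zero =>
    intro a b x h
    rw [PySem.List.pyRange_one_eq_nil (by omega)]
    simp only [List.count_nil]
    split_ifs with hc
    · omega
    · rfl
  | succ n ih =>
    intro a b x h
    have hab : a < b := by omega
    rw [PySem.List.pyRange_one_cons hab, List.count_cons, ih (a + 1) b x (by omega)]
    by_cases hxa : x = a
    · subst hxa
      simp only [beq_self_eq_true, if_true]
      split_ifs <;> omega
    · have hne : (a == x) = false := by simp; omega
      simp only [hne, Bool.false_eq_true, if_false]
      split_ifs <;> omega

lemma pvStepB_foldl_len (T : Nat) (td : List (Int × Int)) (E : List (Int × Int)) :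
    ∀ (c : List Int), (E.foldl (pvStepB T td) c).length = c.length := by
  induction E with
  | nil => intro c; rfl
  | cons p E ih => intro c; simp [List.foldl_cons, ih, pvStepB, pvBump_foldl_length]

lemma pvStepB_foldl_get (T : Nat) (td : List (Int × Int)) (E : List (Int × Int)) :
    ∀ (c : List Int), c.length = T → (∀ p ∈ E, 0 ≤ p.1) → ∀ (k : Nat), k < T →
    PySem.List.pyGetD (E.foldl (pvStepB T td) c) (k : Int) 0
      = PySem.List.pyGetD c (k : Int) 0
        + (E.countP (fun p => decide (p.1 ≤ (k : Int) ∧ (k : Int) < p.1 + pvDur td p.2)) : Int) := by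
  induction E with
  | nil => intro c _ _ k _; simp
  | cons p E ih =>
    intro c hc hE k hk
    have hp0 : 0 ≤ p.1 := hE p (by simp)
    have hc' : (pvStepB T td c p).length = T := by
      rw [pvStepB, pvBump_foldl_length, hc]
    rw [List.foldl_cons,
        ih (pvStepB T td c p) hc' (fun q hq => hE q (List.mem_cons_of_mem _ hq)) k hk]
    have hget : PySem.List.pyGetD (pvStepB T td c p) (k : Int) 0
        = PySem.List.pyGetD c (k : Int) 0
          + ((PySem.List.pyRange p.1 (min (p.1 + pvDur td p.2) (T : Int)) 1).count (k : Int) : Int) := by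
      rw [pvStepB]
      refine pvBump_foldl_get _ c ?_ k (by omega)
      intro j hj
      rw [PySem.List.mem_pyRange_one] at hj
      have hjm : j < min (p.1 + pvDur td p.2) (T : Int) := hj.2
      have hjT : j < (T : Int) := lt_of_lt_of_le hjm (min_le_right _ _)
      exact ⟨le_trans hp0 hj.1, by rw [hc]; exact hjT⟩
    rw [hget, pv_count_pyRange (min (p.1 + pvDur td p.2) (T : Int) - p.1).toNat p.1 _ (k : Int) rfl,
        List.countP_cons]
    have hiff : (p.1 ≤ (k : Int) ∧ (k : Int) < min (p.1 + pvDur td p.2) (T : Int))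
        ↔ (p.1 ≤ (k : Int) ∧ (k : Int) < p.1 + pvDur td p.2) := by
      constructor
      · rintro ⟨h1, h2⟩
        exact ⟨h1, lt_of_lt_of_le h2 (min_le_left _ _)⟩
      · rintro ⟨h1, h2⟩
        exact ⟨h1, lt_min h2 (by exact_mod_cast hk)⟩
    simp only [decide_eq_true_eq]
    rw [if_congr hiff rfl rfl]
    split_ifs <;> push_cast <;> ring

lemma pvStepA_len (T : Nat) (td : List (Int × Int)) (diff : List Int) (p : Int × Int) :
    (pvStepA T td diff p).length = diff.length := by
  rw [pvStepA]
  split <;> simp [PySem.List.length_pySetD]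

lemma pvStepA_get (T : Nat) (td : List (Int × Int)) (p : Int × Int) (diff : List Int)
    (hlen : diff.length = T + 1) (h0 : 0 ≤ p.1) (h1 : p.1 < (T : Int))
    (hd : 0 ≤ pvDur td p.2) (k : Nat) (hk : k < T + 1) :
    PySem.List.pyGetD (pvStepA T td diff p) (k : Int) 0
      = PySem.List.pyGetD diff (k : Int) 0
        + (if p.1 = (k : Int) then 1 else 0)
        - (if p.1 + pvDur td p.2 = (k : Int) then 1 else 0) := by
  have h1n : p.1.toNat < diff.length := by omega
  have h1t : ((p.1.toNat : Nat) : Int) = p.1 := Int.toNat_of_nonneg h0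
  have g1 : ∀ m : Nat,
      PySem.List.pyGetD (PySem.List.pySetD diff p.1 (PySem.List.pyGetD diff p.1 0 + 1)) ((m : Nat) : Int) 0
        = if m = p.1.toNat then PySem.List.pyGetD diff p.1 0 + 1
          else PySem.List.pyGetD diff ((m : Nat) : Int) 0 := by
    intro m
    have h := PySem.List.pyGetD_pySetD_natCast diff p.1.toNat m
      (PySem.List.pyGetD diff p.1 0 + 1) 0 h1n
    rw [h1t] at h
    exact h
  have hlen1 : (PySem.List.pySetD diff p.1 (PySem.List.pyGetD diff p.1 0 + 1)).length = T + 1 := by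
    rw [PySem.List.length_pySetD, hlen]
  simp only [pvStepA]
  by_cases hcase : p.1 + pvDur td p.2 < (T : Int) + 1
  · rw [if_pos hcase]
    have he0 : 0 ≤ p.1 + pvDur td p.2 := by omega
    have het : (((p.1 + pvDur td p.2).toNat : Nat) : Int) = p.1 + pvDur td p.2 :=
      Int.toNat_of_nonneg he0
    have hen : (p.1 + pvDur td p.2).toNat
        < (PySem.List.pySetD diff p.1 (PySem.List.pyGetD diff p.1 0 + 1)).length := by
      rw [hlen1]; omega
    have key := PySem.List.pyGetD_pySetD_natCast
      (PySem.List.pySetD diff p.1 (PySem.List.pyGetD diff p.1 0 + 1))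
      (p.1 + pvDur td p.2).toNat k
      (PySem.List.pyGetD (PySem.List.pySetD diff p.1 (PySem.List.pyGetD diff p.1 0 + 1))
        (p.1 + pvDur td p.2) 0 - 1) 0 hen
    rw [het] at key
    rw [key]
    have hinner : PySem.List.pyGetD
        (PySem.List.pySetD diff p.1 (PySem.List.pyGetD diff p.1 0 + 1)) (p.1 + pvDur td p.2) 0
        = if (p.1 + pvDur td p.2).toNat = p.1.toNat then PySem.List.pyGetD diff p.1 0 + 1
          else PySem.List.pyGetD diff (((p.1 + pvDur td p.2).toNat : Nat) : Int) 0 := by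
      rw [← het]; exact g1 _
    rw [hinner, g1 k]
    by_cases hA : k = (p.1 + pvDur td p.2).toNat
    · by_cases hB : (p.1 + pvDur td p.2).toNat = p.1.toNat
      · have e1 : p.1 = (k : Int) := by omega
        have e2 : p.1 + pvDur td p.2 = (k : Int) := by omega
        rw [if_pos hA, if_pos hB, if_pos e1, if_pos e2, e1]
      · have e1 : ¬ p.1 = (k : Int) := by omega
        have e2 : p.1 + pvDur td p.2 = (k : Int) := by omega
        have e3 : (((p.1 + pvDur td p.2).toNat : Nat) : Int) = (k : Int) := by omega
        rw [if_pos hA, if_neg hB, if_neg e1, if_pos e2, e3]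
        ring
    · rw [if_neg hA]
      by_cases hB : k = p.1.toNat
      · have e1 : p.1 = (k : Int) := by omega
        have e2 : ¬ (p.1 + pvDur td p.2 = (k : Int)) := by omega
        rw [if_pos hB, if_neg e2, if_pos e1, e1]
        ring
      · have e1 : ¬ p.1 = (k : Int) := by omega
        have e2 : ¬ (p.1 + pvDur td p.2 = (k : Int)) := by omega
        rw [if_neg hB, if_neg e1, if_neg e2]
        ring
  · rw [if_neg hcase, g1 k]
    have e2 : ¬ (p.1 + pvDur td p.2 = (k : Int)) := by omega
    by_cases hB : k = p.1.toNat
    · have e1 : p.1 = (k : Int) := by omega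
      rw [if_pos hB, if_neg e2, if_pos e1, e1]
      ring
    · have e1 : ¬ p.1 = (k : Int) := by omega
      rw [if_neg hB, if_neg e1, if_neg e2]
      ring

lemma pvStepA_foldl_get (T : Nat) (td : List (Int × Int)) (E : List (Int × Int)) :
    ∀ (diff : List Int), diff.length = T + 1 →
    (∀ p ∈ E, 0 ≤ p.1 ∧ p.1 < (T : Int) ∧ 0 ≤ pvDur td p.2) → ∀ (k : Nat), k < T + 1 →
    PySem.List.pyGetD (E.foldl (pvStepA T td) diff) (k : Int) 0
      = PySem.List.pyGetD diff (k : Int) 0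
        + (E.countP (fun p => decide (p.1 = (k : Int))) : Int)
        - (E.countP (fun p => decide (p.1 + pvDur td p.2 = (k : Int))) : Int) := by
  induction E with
  | nil => intro diff _ _ k _; simp
  | cons p E ih =>
    intro diff hlen hE k hk
    obtain ⟨h0, h1, hd⟩ := hE p (by simp)
    rw [List.foldl_cons,
        ih (pvStepA T td diff p) (by rw [pvStepA_len, hlen])
          (fun q hq => hE q (List.mem_cons_of_mem _ hq)) k hk,
        pvStepA_get T td p diff hlen h0 h1 hd k hk]
    simp only [List.countP_cons, decide_eq_true_eq]
    push_cast
    split_ifs <;> ring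

lemma pvIntegrate_eq (diff : List Int) (T : Nat) :
    pvIntegrate diff T
      = ((List.range T).map (fun k =>
            ((List.range (k + 1)).map (fun (j : Nat) => PySem.List.pyGetD diff ((j : Nat) : Int) 0)).sum),
         ((List.range T).map (fun (j : Nat) => PySem.List.pyGetD diff ((j : Nat) : Int) 0)).sum) := by
  induction T with
  | zero =>
    rw [pvIntegrate, show (((0 : Nat)) : Int) = 0 from rfl, PySem.List.pyRange_one_eq_nil le_rfl]
    simp
  | succ T ih =>
    rw [pvIntegrate] at ih ⊢
    rw [show (((T + 1 : Nat)) : Int) = (T : Int) + 1 by push_cast; ring,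
        PySem.List.pyRange_one_succ_right (Int.natCast_nonneg T), List.foldl_append, ih]
    simp only [List.foldl_cons, List.foldl_nil]
    simp [List.range_succ, List.map_append, List.sum_append]

lemma pv_sum_ind (x : Int) (n : Nat) :
    ((List.range n).map (fun (j : Nat) => if x = ((j : Nat) : Int) then (1 : Int) else 0)).sum
      = if 0 ≤ x ∧ x < (n : Int) then 1 else 0 := by
  induction n with
  | zero =>
    simp only [List.range_zero, List.map_nil, List.sum_nil, Nat.cast_zero]
    split_ifs with h
    · omega
    · rfl
  | succ n ih =>
    rw [List.range_succ, List.map_append, List.sum_append, ih]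
    simp only [List.map_cons, List.map_nil, List.sum_cons, List.sum_nil]
    push_cast
    split_ifs <;> omega

lemma pv_sum_countP (E : List (Int × Int)) (f : Int × Int → Int)
    (hE : ∀ p ∈ E, 0 ≤ f p) (n : Nat) :
    ((List.range n).map (fun (j : Nat) => (E.countP (fun p => decide (f p = ((j : Nat) : Int))) : Int))).sum
      = (E.countP (fun p => decide (f p < (n : Int))) : Int) := by
  revert hE
  induction E with
  | nil => intro _; simp
  | cons p E ih =>
    intro hE
    have hp0 : 0 ≤ f p := hE p (by simp)
    have ih' := ih (fun q hq => hE q (List.mem_cons_of_mem _ hq))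
    simp only [List.countP_cons, decide_eq_true_eq]
    push_cast
    rw [PySem.List.sum_map_add_int (List.range n)
          (fun (j : Nat) => ((E.countP (fun p => decide (f p = ((j : Nat) : Int)))) : Int))
          (fun (j : Nat) => if f p = ((j : Nat) : Int) then (1 : Int) else 0),
        ih', pv_sum_ind (f p) n]
    split_ifs <;> omega

lemma pv_sum_map_sub (xs : List Nat) (f g : Nat → Int) :
    (xs.map (fun x => f x - g x)).sum = (xs.map f).sum - (xs.map g).sum := by
  induction xs with
  | nil => simp
  | cons a xs ih => simp [ih]; ring

lemma pv_countP_sub (E : List (Int × Int)) (f g : Int × Int → Int)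
    (hg : ∀ p ∈ E, 0 ≤ g p) (k : Int) :
    (E.countP (fun p => decide (f p ≤ k)) : Int)
      - (E.countP (fun p => decide (f p + g p ≤ k)) : Int)
      = (E.countP (fun p => decide (f p ≤ k ∧ k < f p + g p)) : Int) := by
  induction E with
  | nil => simp
  | cons p E ih =>
    have hp := hg p (by simp)
    have ih' := ih (fun q hq => hg q (List.mem_cons_of_mem _ hq))
    simp only [List.countP_cons, decide_eq_true_eq]
    push_cast
    split_ifs <;> omega

-- ===== VERDICT (by name: the statement is the Claim_ definition above) =====
theorem calculate_task_counts1_spec : Claim_equal_calculate_task_counts1 := by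
  unfold Claim_equal_calculate_task_counts1
  intro ts td _ hpre
  unfold Spec_calculate_task_counts1
  simp only [calculate_task_counts1, calculate_task_counts1_alt]
  have hE : ∀ p ∈ PySem.List.enumerate ts 0,
      0 ≤ p.1 ∧ p.1 < (ts.length : Int) ∧ 0 ≤ pvDur td p.2 := by
    intro p hp
    rw [PySem.List.mem_enumerate_iff] at hp
    obtain ⟨k, hkl, rfl⟩ := hp
    refine ⟨by omega, by omega, ?_⟩
    simpa [pvDur] using (hpre ts[k] (List.getElem_mem hkl)).2
  rw [pvIntegrate_eq]
  dsimp only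
  apply List.ext_getElem
  · rw [List.length_map, List.length_range, pvStepB_foldl_len, List.length_replicate]
  intro k hk1 hk2
  have hk : k < ts.length := by simpa using hk1
  rw [List.getElem_map, List.getElem_range]
  have hgetR : (List.foldl (pvStepB ts.length td) (List.replicate ts.length 0)
        (PySem.List.enumerate ts 0))[k]
      = PySem.List.pyGetD (List.foldl (pvStepB ts.length td) (List.replicate ts.length 0)
          (PySem.List.enumerate ts 0)) ((k : Nat) : Int) 0 := by
    rw [PySem.List.pyGetD_natCast, List.getD_eq_getElem?_getD, List.getElem?_eq_getElem hk2,
        Option.getD_some]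
  rw [hgetR, pvStepB_foldl_get ts.length td (PySem.List.enumerate ts 0)
        (List.replicate ts.length 0) (List.length_replicate)
        (fun p hp => (hE p hp).1) k hk]
  have hz : PySem.List.pyGetD (List.replicate ts.length (0 : Int)) ((k : Nat) : Int) 0 = 0 := by
    rw [PySem.List.pyGetD_natCast]
    simp only [List.getD_eq_getElem?_getD, List.getElem?_replicate]
    split <;> rfl
  rw [hz, zero_add]
  have hchar : ∀ j ∈ List.range (k + 1),
      PySem.List.pyGetD (List.foldl (pvStepA ts.length td)
          (List.replicate (ts.length + 1) 0) (PySem.List.enumerate ts 0)) ((j : Nat) : Int) 0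
        = ((PySem.List.enumerate ts 0).countP
              (fun p => decide (p.1 = ((j : Nat) : Int))) : Int)
          - ((PySem.List.enumerate ts 0).countP
              (fun p => decide (p.1 + pvDur td p.2 = ((j : Nat) : Int))) : Int) := by
    intro j hj
    rw [List.mem_range] at hj
    rw [pvStepA_foldl_get ts.length td (PySem.List.enumerate ts 0)
          (List.replicate (ts.length + 1) 0) (List.length_replicate) hE j (by omega)]
    have hz2 : PySem.List.pyGetD (List.replicate (ts.length + 1) (0 : Int)) ((j : Nat) : Int) 0
        = 0 := by
      rw [PySem.List.pyGetD_natCast]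
      simp only [List.getD_eq_getElem?_getD, List.getElem?_replicate]
      split <;> rfl
    rw [hz2, zero_add]
  rw [List.map_congr_left hchar, pv_sum_map_sub (List.range (k + 1)) _ _,
      pv_sum_countP (PySem.List.enumerate ts 0) (fun p => p.1)
        (fun p hp => (hE p hp).1) (k + 1),
      pv_sum_countP (PySem.List.enumerate ts 0) (fun p => p.1 + pvDur td p.2)
        (fun p hp => by have h1 := (hE p hp).1; have h2 := (hE p hp).2.2; dsimp only; omega) (k + 1)]
  have c1 : (PySem.List.enumerate ts 0).countP (fun p => decide (p.1 < ((k + 1 : Nat) : Int)))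
      = (PySem.List.enumerate ts 0).countP (fun p => decide (p.1 ≤ (k : Int))) := by
    apply List.countP_congr
    intro x _
    simp only [decide_eq_true_eq]
    push_cast
    omega
  have c2 : (PySem.List.enumerate ts 0).countP
        (fun p => decide (p.1 + pvDur td p.2 < ((k + 1 : Nat) : Int)))
      = (PySem.List.enumerate ts 0).countP
        (fun p => decide (p.1 + pvDur td p.2 ≤ (k : Int))) := by
    apply List.countP_congr
    intro x _
    simp only [decide_eq_true_eq]
    push_cast
    omega
  rw [c1, c2]
  exact pv_countP_sub (PySem.List.enumerate ts 0) (fun p => p.1) (fun p => pvDur td p.2)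
    (fun p hp => (hE p hp).2.2) (k : Int)
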